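-- pv_equiv track=rewrite | github.com/NeuroGranberg/NILS | backend/src/qc/axes_service.py | _determine_axis_flags
-- ===== SOURCE A (Python) =====
-- AXES_REASON_PREFIXES = {
--     "base": ["base:"],
--     "technique": ["technique:"],
--     "modifier": ["modifier:"],
--     "provenance": ["provenance:"],
--     "construct": ["construct:"],
-- }
--
-- def _determine_axis_flags(review_reasons: str | None) -> dict[str, str | None]:
--     """
--     Determine which axes have flags and what type of flag.
--
--     Returns dict like: {"base": "missing", "technique": "conflict", ...}
--     """
--     flags = {}
--     if not review_reasons:
--         return flags
--
--     # Parse each reason individually to avoid cross-axis contamination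
--     reasons = [r.strip().lower() for r in review_reasons.split(",") if r.strip()]
--
--     for axis, prefixes in AXES_REASON_PREFIXES.items():
--         for reason in reasons:
--             # Check if this specific reason belongs to this axis
--             if any(reason.startswith(p.lower()) for p in prefixes):
--                 # Extract flag type from THIS reason only
--                 if "missing" in reason:
--                     flags[axis] = "missing"
--                 elif "conflict" in reason:
--                     flags[axis] = "conflict"
--                 elif "low_confidence" in reason:
--                     flags[axis] = "low_confidence"
--                 elif "ambiguous" in reason:
--                     flags[axis] = "ambiguous"
--                 else:
--                     flags[axis] = "review"
--                 break  # Found flag for this axis, move to next axis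
--
--     return flags
-- ===== SOURCE B (Python) =====
-- AXES_REASON_PREFIXES = {
--     "base": ["base:"],
--     "technique": ["technique:"],
--     "modifier": ["modifier:"],
--     "provenance": ["provenance:"],
--     "construct": ["construct:"],
-- }
--
-- # Inverted lookup: lowercased prefix -> axis, built once.
-- _PREFIX_TO_AXIS = [(p.lower(), axis)
--                    for axis, ps in AXES_REASON_PREFIXES.items() for p in ps]
--
-- _FLAG_KEYWORDS = ["missing", "conflict", "low_confidence", "ambiguous"]
--
--
-- def _classify(reason):
--     for kw in _FLAG_KEYWORDS:
--         if kw in reason: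
--             return kw
--     return "review"
--
--
-- def _determine_axis_flags(review_reasons):
--     if not review_reasons:
--         return {}
--     reasons = [r.strip().lower() for r in review_reasons.split(",") if r.strip()]
--     found = {}
--     for reason in reasons:
--         axis = next((a for p, a in _PREFIX_TO_AXIS if reason.startswith(p)), None)
--         if axis is not None and axis not in found:
--             found[axis] = _classify(reason)
--     return {axis: found[axis] for axis in AXES_REASON_PREFIXES if axis in found}
-- ===== Notes on version B (the rewrite author's own statement) =====
-- stated objective: alternative
-- what changed: Replaces A's axis-outer/reason-inner nested scan with a single pass over the reasons using an inverted prefix->axis lookup and a first-wins dict, then emits flags in axis order; the keyword cascade is factored into a data-driven classifier.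
import Mathlib
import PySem

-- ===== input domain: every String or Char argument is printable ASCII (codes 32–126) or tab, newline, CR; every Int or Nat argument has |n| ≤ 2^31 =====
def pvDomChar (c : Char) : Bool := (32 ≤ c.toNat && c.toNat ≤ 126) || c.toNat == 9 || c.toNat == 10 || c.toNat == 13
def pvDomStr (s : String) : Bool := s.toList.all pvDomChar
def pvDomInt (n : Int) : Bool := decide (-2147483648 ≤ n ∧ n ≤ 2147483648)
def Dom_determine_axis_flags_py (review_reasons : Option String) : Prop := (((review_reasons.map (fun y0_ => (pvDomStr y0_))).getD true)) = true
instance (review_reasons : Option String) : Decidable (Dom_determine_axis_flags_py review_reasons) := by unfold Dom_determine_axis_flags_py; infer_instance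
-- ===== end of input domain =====

-- B replaces A's axis-outer/reason-inner nested scan by one pass over the reasons with an
-- inverted prefix→axis lookup and a first-wins dict, emitted in axis order (alternative decomposition).

-- ===== PORT A =====

def pvAxesPrefixes : List (String × List String) :=
  [("base", ["base:"]), ("technique", ["technique:"]), ("modifier", ["modifier:"]),
   ("provenance", ["provenance:"]), ("construct", ["construct:"])]

-- shared by both ports: [r.strip().lower() for r in s.split(",") if r.strip()]
def pvParseReasons (s : String) : List String :=
  (((PySem.Str.split? s ",").getD []).filter (fun r => PySem.Str.strip r != "")).map
    (fun r => PySem.Str.lower (PySem.Str.strip r))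

-- A's inner 'for reason in reasons: … break' loop for one axis
def pvAFindFlag (axis : String) (prefixes : List String) (reasons : List String)
    (flags : PySem.Dict String String) : PySem.Dict String String :=
  match reasons with
  | [] => flags
  | reason :: rest =>
    if prefixes.any (fun p => PySem.Str.startswith reason (PySem.Str.lower p)) then
      flags.insert axis
        (if PySem.Str.isIn "missing" reason then "missing"
         else if PySem.Str.isIn "conflict" reason then "conflict"
         else if PySem.Str.isIn "low_confidence" reason then "low_confidence"
         else if PySem.Str.isIn "ambiguous" reason then "ambiguous"
         else "review")
    else pvAFindFlag axis prefixes rest flags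

def determine_axis_flags_py (review_reasons : Option String) : List (String × String) :=
  match review_reasons with
  | none => (PySem.Dict.empty : PySem.Dict String String).items
  | some s =>
    if s = "" then (PySem.Dict.empty : PySem.Dict String String).items
    else
      let reasons := pvParseReasons s
      (pvAxesPrefixes.foldl (fun flags ap => pvAFindFlag ap.1 ap.2 reasons flags)
        (PySem.Dict.empty : PySem.Dict String String)).items

-- ===== PORT B =====

def pvPrefixToAxis : List (String × String) :=
  [("base:", "base"), ("technique:", "technique"), ("modifier:", "modifier"),
   ("provenance:", "provenance"), ("construct:", "construct")]

def pvFlagKeywords : List String := ["missing", "conflict", "low_confidence", "ambiguous"]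

def pvClassify (reason : String) : String :=
  match pvFlagKeywords.find? (fun kw => PySem.Str.isIn kw reason) with
  | some kw => kw
  | none => "review"

def pvMatchAxis (reason : String) : Option String :=
  (pvPrefixToAxis.find? (fun pa => PySem.Str.startswith reason pa.1)).map (·.2)

def pvAxisOrder : List String := ["base", "technique", "modifier", "provenance", "construct"]

def pvFoundStep (d : PySem.Dict String String) (reason : String) : PySem.Dict String String :=
  match pvMatchAxis reason with
  | some axis => if d.contains axis then d else d.insert axis (pvClassify reason)
  | none => d

def determine_axis_flags_py_alt (review_reasons : Option String) : List (String × String) :=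
  match review_reasons with
  | none => []
  | some s =>
    if s = "" then []
    else
      let reasons := pvParseReasons s
      let found := reasons.foldl pvFoundStep (PySem.Dict.empty : PySem.Dict String String)
      pvAxisOrder.filterMap (fun axis => (found.get? axis).map (fun f => (axis, f)))

-- ===== PRECONDITION & SPEC =====
def Spec_determine_axis_flags_py (review_reasons : Option String) (out : List (String × String)) : Prop := out = determine_axis_flags_py_alt review_reasons
instance (review_reasons : Option String) (out : List (String × String)) : Decidable (Spec_determine_axis_flags_py review_reasons out) := by unfold Spec_determine_axis_flags_py; infer_instance

-- ===== CLAIM (what is proved, stated in full; the proofs are below) =====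
def Claim_equal_determine_axis_flags_py : Prop := ∀ (review_reasons : Option String), Dom_determine_axis_flags_py review_reasons → Spec_determine_axis_flags_py review_reasons (determine_axis_flags_py review_reasons)

-- ===== LEMMAS AND PROOFS =====

-- two prefixes with different first characters cannot both match
theorem pv_sw_excl (r p q : String) (hp : PySem.Str.startswith r p = true)
    (hph : p.toList ≠ []) (hqh : q.toList ≠ [])
    (hne : p.toList.head? ≠ q.toList.head?) : PySem.Str.startswith r q = false := by
  by_contra h
  rw [Bool.not_eq_false] at h
  rw [PySem.Str.startswith_eq, PySem.Chars.startswith_iff] at hp h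
  obtain ⟨t1, e1⟩ := hp
  obtain ⟨t2, e2⟩ := h
  apply hne
  have h1 : (p.toList ++ t1).head? = (q.toList ++ t2).head? := by rw [e1, e2]
  cases hp' : p.toList with
  | nil => exact absurd hp' hph
  | cons a l =>
    cases hq' : q.toList with
    | nil => exact absurd hq' hqh
    | cons b m => rw [hp', hq'] at h1; simpa using h1

-- A's per-axis scan is the first matching reason, classified
theorem pvAFindFlag_eq (axis : String) (prefixes : List String) (reasons : List String)
    (flags : PySem.Dict String String) :
    pvAFindFlag axis prefixes reasons flags =
      match (reasons.find? (fun r =>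
          prefixes.any (fun p => PySem.Str.startswith r (PySem.Str.lower p)))).map pvClassify with
      | none => flags
      | some v => flags.insert axis v := by
  induction reasons with
  | nil => rfl
  | cons r rest ih =>
    rw [pvAFindFlag]
    by_cases h : prefixes.any (fun p => PySem.Str.startswith r (PySem.Str.lower p)) = true
    · rw [show List.find? (fun r => prefixes.any fun p => PySem.Str.startswith r (PySem.Str.lower p)) (r :: rest) = some r from List.find?_cons_of_pos h]
      simp only [h, if_true, Option.map_some]
      congr 1
      simp [pvClassify, pvFlagKeywords, List.find?]
      split_ifs <;> simp_all
    · rw [Bool.not_eq_true] at h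
      rw [show List.find? (fun r => prefixes.any fun p => PySem.Str.startswith r (PySem.Str.lower p)) (r :: rest) = List.find? (fun r => prefixes.any fun p => PySem.Str.startswith r (PySem.Str.lower p)) rest from List.find?_cons_of_neg (by simp only [h]; decide)]
      simp only [h, Bool.false_eq_true, if_false]
      exact ih

-- chain of conditional fresh inserts, as an items list
theorem pv_chain_items (axes : List (String × List String)) (reasons : List String)
    (d : PySem.Dict String String)
    (hfresh : ∀ ap ∈ axes, d.contains ap.1 = false)
    (hnd : (axes.map (·.1)).Nodup) :
    (axes.foldl (fun flags ap => pvAFindFlag ap.1 ap.2 reasons flags) d).items =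
      d.items ++ axes.filterMap (fun ap =>
        ((reasons.find? (fun r =>
          ap.2.any (fun p => PySem.Str.startswith r (PySem.Str.lower p)))).map pvClassify).map
          (fun v => (ap.1, v))) := by
  induction axes generalizing d with
  | nil => simp
  | cons ap rest ih =>
    simp only [List.foldl_cons, List.filterMap_cons]
    rw [pvAFindFlag_eq]
    cases hv : (reasons.find? (fun r =>
        ap.2.any (fun p => PySem.Str.startswith r (PySem.Str.lower p)))).map pvClassify with
    | none =>
      rw [ih d (fun b hb => hfresh b (List.mem_cons_of_mem _ hb)) (by simpa using hnd.of_cons)]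
      rfl
    | some v =>
      have hfr : d.contains ap.1 = false := hfresh ap (List.mem_cons_self)
      rw [ih (d.insert ap.1 v) ?_ (by simpa using hnd.of_cons)]
      · rw [PySem.Dict.items_insert_of_not_contains _ _ hfr, List.append_assoc]
        rfl
      · intro b hb
        rw [PySem.Dict.contains_insert]
        have hne : b.1 ≠ ap.1 := by
          simp only [List.map_cons, List.nodup_cons] at hnd
          intro he
          exact hnd.1 (he ▸ List.mem_map_of_mem hb)
        simp [hne, hfresh b (List.mem_cons_of_mem _ hb)]

-- B's first-wins fold, looked up
theorem pv_found_get? (reasons : List String) (d : PySem.Dict String String) (a : String) :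
    (reasons.foldl pvFoundStep d).get? a =
      (d.get? a).or ((reasons.find? (fun r => pvMatchAxis r == some a)).map pvClassify) := by
  induction reasons generalizing d with
  | nil => simp
  | cons r rest ih =>
    rw [List.foldl_cons, List.find?_cons]
    by_cases hc : pvMatchAxis r == some a
    · have hax : pvMatchAxis r = some a := by simpa using hc
      simp only [hc]
      rw [pvFoundStep, hax]
      by_cases hcon : d.contains a = true
      · have hs : (d.get? a).isSome := by rw [← PySem.Dict.contains_eq_isSome_get?]; exact hcon
        obtain ⟨w, hw⟩ := Option.isSome_iff_exists.mp hs
        simp only [hcon, if_true]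
        rw [ih, hw]
        rfl
      · rw [Bool.not_eq_true] at hcon
        have hg : d.get? a = none := by
          have hh := PySem.Dict.contains_eq_isSome_get? d a
          rw [hcon] at hh
          exact Option.not_isSome_iff_eq_none.mp (by simp [← hh])
        simp only [hcon, Bool.false_eq_true, if_false]
        rw [ih, PySem.Dict.get?_insert_self, hg]
        rfl
    · rw [Bool.not_eq_true] at hc
      simp only [hc, if_false]
      rw [pvFoundStep]
      cases hax : pvMatchAxis r with
      | none => exact ih d
      | some b =>
        have hba : b ≠ a := by
          intro he; rw [hax, he] at hc; simp at hc
        by_cases hcon : d.contains b = true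
        · simp only [hcon, if_true]; exact ih d
        · rw [Bool.not_eq_true] at hcon
          simp only [hcon, Bool.false_eq_true, if_false]
          rw [ih, PySem.Dict.get?_insert_of_ne _ _ (Ne.symm hba)]

-- per-axis: B's inverted-lookup condition equals A's startswith condition
theorem pvMatch_base (r : String) :
    (pvMatchAxis r == some "base") = PySem.Str.startswith r "base:" := by
  simp only [pvMatchAxis, pvPrefixToAxis, List.find?]
  cases h1 : PySem.Str.startswith r "base:" <;>
  cases h2 : PySem.Str.startswith r "technique:" <;>
  cases h3 : PySem.Str.startswith r "modifier:" <;>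
  cases h4 : PySem.Str.startswith r "provenance:" <;>
  cases h5 : PySem.Str.startswith r "construct:" <;>
  simp only [Option.map_some, Option.map_none] <;>
  decide

theorem pvMatch_technique (r : String) :
    (pvMatchAxis r == some "technique") = PySem.Str.startswith r "technique:" := by
  simp only [pvMatchAxis, pvPrefixToAxis, List.find?]
  cases h1 : PySem.Str.startswith r "base:" <;>
  cases h2 : PySem.Str.startswith r "technique:" <;>
  cases h3 : PySem.Str.startswith r "modifier:" <;>
  cases h4 : PySem.Str.startswith r "provenance:" <;>
  cases h5 : PySem.Str.startswith r "construct:" <;>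
  simp only [Option.map_some, Option.map_none] <;>
  first
  | decide
  | exact absurd h2 (by rw [pv_sw_excl r "base:" "technique:" h1 (by decide) (by decide) (by decide)]; decide)
  | exact absurd h3 (by rw [pv_sw_excl r "base:" "modifier:" h1 (by decide) (by decide) (by decide)]; decide)
  | exact absurd h4 (by rw [pv_sw_excl r "base:" "provenance:" h1 (by decide) (by decide) (by decide)]; decide)
  | exact absurd h5 (by rw [pv_sw_excl r "base:" "construct:" h1 (by decide) (by decide) (by decide)]; decide)
  | exact absurd h3 (by rw [pv_sw_excl r "technique:" "modifier:" h2 (by decide) (by decide) (by decide)]; decide)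
  | exact absurd h4 (by rw [pv_sw_excl r "technique:" "provenance:" h2 (by decide) (by decide) (by decide)]; decide)
  | exact absurd h5 (by rw [pv_sw_excl r "technique:" "construct:" h2 (by decide) (by decide) (by decide)]; decide)
  | exact absurd h4 (by rw [pv_sw_excl r "modifier:" "provenance:" h3 (by decide) (by decide) (by decide)]; decide)
  | exact absurd h5 (by rw [pv_sw_excl r "modifier:" "construct:" h3 (by decide) (by decide) (by decide)]; decide)
  | exact absurd h5 (by rw [pv_sw_excl r "provenance:" "construct:" h4 (by decide) (by decide) (by decide)]; decide)

theorem pvMatch_modifier (r : String) :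
    (pvMatchAxis r == some "modifier") = PySem.Str.startswith r "modifier:" := by
  simp only [pvMatchAxis, pvPrefixToAxis, List.find?]
  cases h1 : PySem.Str.startswith r "base:" <;>
  cases h2 : PySem.Str.startswith r "technique:" <;>
  cases h3 : PySem.Str.startswith r "modifier:" <;>
  cases h4 : PySem.Str.startswith r "provenance:" <;>
  cases h5 : PySem.Str.startswith r "construct:" <;>
  simp only [Option.map_some, Option.map_none] <;>
  first
  | decide
  | exact absurd h2 (by rw [pv_sw_excl r "base:" "technique:" h1 (by decide) (by decide) (by decide)]; decide)
  | exact absurd h3 (by rw [pv_sw_excl r "base:" "modifier:" h1 (by decide) (by decide) (by decide)]; decide)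
  | exact absurd h4 (by rw [pv_sw_excl r "base:" "provenance:" h1 (by decide) (by decide) (by decide)]; decide)
  | exact absurd h5 (by rw [pv_sw_excl r "base:" "construct:" h1 (by decide) (by decide) (by decide)]; decide)
  | exact absurd h3 (by rw [pv_sw_excl r "technique:" "modifier:" h2 (by decide) (by decide) (by decide)]; decide)
  | exact absurd h4 (by rw [pv_sw_excl r "technique:" "provenance:" h2 (by decide) (by decide) (by decide)]; decide)
  | exact absurd h5 (by rw [pv_sw_excl r "technique:" "construct:" h2 (by decide) (by decide) (by decide)]; decide)
  | exact absurd h4 (by rw [pv_sw_excl r "modifier:" "provenance:" h3 (by decide) (by decide) (by decide)]; decide)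
  | exact absurd h5 (by rw [pv_sw_excl r "modifier:" "construct:" h3 (by decide) (by decide) (by decide)]; decide)
  | exact absurd h5 (by rw [pv_sw_excl r "provenance:" "construct:" h4 (by decide) (by decide) (by decide)]; decide)

theorem pvMatch_provenance (r : String) :
    (pvMatchAxis r == some "provenance") = PySem.Str.startswith r "provenance:" := by
  simp only [pvMatchAxis, pvPrefixToAxis, List.find?]
  cases h1 : PySem.Str.startswith r "base:" <;>
  cases h2 : PySem.Str.startswith r "technique:" <;>
  cases h3 : PySem.Str.startswith r "modifier:" <;>
  cases h4 : PySem.Str.startswith r "provenance:" <;>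
  cases h5 : PySem.Str.startswith r "construct:" <;>
  simp only [Option.map_some, Option.map_none] <;>
  first
  | decide
  | exact absurd h2 (by rw [pv_sw_excl r "base:" "technique:" h1 (by decide) (by decide) (by decide)]; decide)
  | exact absurd h3 (by rw [pv_sw_excl r "base:" "modifier:" h1 (by decide) (by decide) (by decide)]; decide)
  | exact absurd h4 (by rw [pv_sw_excl r "base:" "provenance:" h1 (by decide) (by decide) (by decide)]; decide)
  | exact absurd h5 (by rw [pv_sw_excl r "base:" "construct:" h1 (by decide) (by decide) (by decide)]; decide)
  | exact absurd h3 (by rw [pv_sw_excl r "technique:" "modifier:" h2 (by decide) (by decide) (by decide)]; decide)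
  | exact absurd h4 (by rw [pv_sw_excl r "technique:" "provenance:" h2 (by decide) (by decide) (by decide)]; decide)
  | exact absurd h5 (by rw [pv_sw_excl r "technique:" "construct:" h2 (by decide) (by decide) (by decide)]; decide)
  | exact absurd h4 (by rw [pv_sw_excl r "modifier:" "provenance:" h3 (by decide) (by decide) (by decide)]; decide)
  | exact absurd h5 (by rw [pv_sw_excl r "modifier:" "construct:" h3 (by decide) (by decide) (by decide)]; decide)
  | exact absurd h5 (by rw [pv_sw_excl r "provenance:" "construct:" h4 (by decide) (by decide) (by decide)]; decide)

theorem pvMatch_construct (r : String) :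
    (pvMatchAxis r == some "construct") = PySem.Str.startswith r "construct:" := by
  simp only [pvMatchAxis, pvPrefixToAxis, List.find?]
  cases h1 : PySem.Str.startswith r "base:" <;>
  cases h2 : PySem.Str.startswith r "technique:" <;>
  cases h3 : PySem.Str.startswith r "modifier:" <;>
  cases h4 : PySem.Str.startswith r "provenance:" <;>
  cases h5 : PySem.Str.startswith r "construct:" <;>
  simp only [Option.map_some, Option.map_none] <;>
  first
  | decide
  | exact absurd h2 (by rw [pv_sw_excl r "base:" "technique:" h1 (by decide) (by decide) (by decide)]; decide)
  | exact absurd h3 (by rw [pv_sw_excl r "base:" "modifier:" h1 (by decide) (by decide) (by decide)]; decide)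
  | exact absurd h4 (by rw [pv_sw_excl r "base:" "provenance:" h1 (by decide) (by decide) (by decide)]; decide)
  | exact absurd h5 (by rw [pv_sw_excl r "base:" "construct:" h1 (by decide) (by decide) (by decide)]; decide)
  | exact absurd h3 (by rw [pv_sw_excl r "technique:" "modifier:" h2 (by decide) (by decide) (by decide)]; decide)
  | exact absurd h4 (by rw [pv_sw_excl r "technique:" "provenance:" h2 (by decide) (by decide) (by decide)]; decide)
  | exact absurd h5 (by rw [pv_sw_excl r "technique:" "construct:" h2 (by decide) (by decide) (by decide)]; decide)
  | exact absurd h4 (by rw [pv_sw_excl r "modifier:" "provenance:" h3 (by decide) (by decide) (by decide)]; decide)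
  | exact absurd h5 (by rw [pv_sw_excl r "modifier:" "construct:" h3 (by decide) (by decide) (by decide)]; decide)
  | exact absurd h5 (by rw [pv_sw_excl r "provenance:" "construct:" h4 (by decide) (by decide) (by decide)]; decide)

-- the main body lemma, over the parsed reasons
theorem pv_core (reasons : List String) :
    (pvAxesPrefixes.foldl (fun flags ap => pvAFindFlag ap.1 ap.2 reasons flags)
        (PySem.Dict.empty : PySem.Dict String String)).items =
      pvAxisOrder.filterMap (fun axis =>
        ((reasons.foldl pvFoundStep (PySem.Dict.empty : PySem.Dict String String)).get? axis).map
          (fun f => (axis, f))) := by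
  rw [pv_chain_items _ _ _ (by intro ap _; simp) (by decide)]
  simp only [pvAxesPrefixes, pvAxisOrder, List.filterMap_cons, List.filterMap_nil]
  rw [pv_found_get?, pv_found_get?, pv_found_get?, pv_found_get?, pv_found_get?]
  have e1 : (fun r => pvMatchAxis r == some "base") = (fun r => PySem.Str.startswith r "base:") :=
    funext pvMatch_base
  have e2 : (fun r => pvMatchAxis r == some "technique") = (fun r => PySem.Str.startswith r "technique:") :=
    funext pvMatch_technique
  have e3 : (fun r => pvMatchAxis r == some "modifier") = (fun r => PySem.Str.startswith r "modifier:") :=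
    funext pvMatch_modifier
  have e4 : (fun r => pvMatchAxis r == some "provenance") = (fun r => PySem.Str.startswith r "provenance:") :=
    funext pvMatch_provenance
  have e5 : (fun r => pvMatchAxis r == some "construct") = (fun r => PySem.Str.startswith r "construct:") :=
    funext pvMatch_construct
  rw [e1, e2, e3, e4, e5]
  have lb : PySem.Chars.lower ['b','a','s','e',':'] = ['b','a','s','e',':'] := by decide
  have lt : PySem.Chars.lower ['t','e','c','h','n','i','q','u','e',':'] = ['t','e','c','h','n','i','q','u','e',':'] := by decide
  have lm : PySem.Chars.lower ['m','o','d','i','f','i','e','r',':'] = ['m','o','d','i','f','i','e','r',':'] := by decide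
  have lp : PySem.Chars.lower ['p','r','o','v','e','n','a','n','c','e',':'] = ['p','r','o','v','e','n','a','n','c','e',':'] := by decide
  have lc : PySem.Chars.lower ['c','o','n','s','t','r','u','c','t',':'] = ['c','o','n','s','t','r','u','c','t',':'] := by decide
  have he : (PySem.Dict.empty : PySem.Dict String String).items = [] := rfl
  simp [Option.map_map, lb, lt, lm, lp, lc, he]

-- ===== VERDICT (by name: the statement is the Claim_ definition above) =====
theorem determine_axis_flags_py_spec : Claim_equal_determine_axis_flags_py := by
  intro review_reasons _
  unfold Spec_determine_axis_flags_py determine_axis_flags_py determine_axis_flags_py_alt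
  cases review_reasons with
  | none => rfl
  | some s =>
    by_cases hs : s = ""
    · subst hs
      rfl
    · simp only [hs, if_false]
      exact pv_core (pvParseReasons s)
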